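-- pv_equiv track=rewrite | github.com/wjk1011/BasicToAdvanced | Programmers/SkillCheck/Lv3실패_이찬규2트.py | solution
-- ===== SOURCE A (Python) =====
-- def solution(e, starts):
--     answer = []
--     for s in starts:
--         n, m = 1, 1
--         dict_num = {i:0 for i in range(s, e+1)}
--         while True:
--             if n * m > e:
--                 n += 1
--                 m = n+1
--
--             else:
--                 if n*m in dict_num:
--                     dict_num[n*m] += 1
--                 m += 1
--
--             if n == e+1:
--                 for i in dict_num:
--                     if dict_num[i] == max(dict_num.values()):
--                         answer.append(i)
--                         break
--                 break
--
--
--     return answer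
-- ===== SOURCE B (Python) =====
-- def solution(e, starts):
--     # A diverges (infinite while loop) when e < 1; under the precondition e >= 1 this
--     # early return is never taken.
--     answer = []
--     if e < 1:
--         return answer
--     # cnt[k] = number of times A's (n, m) walk hits k: once for n = 1 (k in 1..e),
--     # plus once per factorisation k = d*m with 2 <= d < m.
--     cnt = [0] * (e + 1)
--     for k in range(1, e + 1):
--         cnt[k] = 1
--     for d in range(2, e + 1):
--         for m in range(d + 1, e // d + 1):
--             cnt[d * m] += 1
--     # best[k] = smallest index in [k..e] attaining the maximal cnt on [k..e]
--     best = [0] * (e + 1)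
--     best[e] = e
--     for k in range(e - 1, 0, -1):
--         best[k] = k if cnt[k] >= cnt[best[k + 1]] else best[k + 1]
--     for s in starts:
--         if s <= e:
--             answer.append(best[s if s >= 1 else 1])
--     return answer
-- ===== Notes on version B (the rewrite author's own statement) =====
-- stated objective: faster
-- what changed: Instead of re-simulating the whole (n,m) product walk over a per-start dict and re-scanning (with max() recomputed per key) for every start, B sieves the hit-counts once into an array, precomputes a suffix table best[k] = first argmax on [k..e], and answers each start with one O(1) table lookup.
import Mathlib
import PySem

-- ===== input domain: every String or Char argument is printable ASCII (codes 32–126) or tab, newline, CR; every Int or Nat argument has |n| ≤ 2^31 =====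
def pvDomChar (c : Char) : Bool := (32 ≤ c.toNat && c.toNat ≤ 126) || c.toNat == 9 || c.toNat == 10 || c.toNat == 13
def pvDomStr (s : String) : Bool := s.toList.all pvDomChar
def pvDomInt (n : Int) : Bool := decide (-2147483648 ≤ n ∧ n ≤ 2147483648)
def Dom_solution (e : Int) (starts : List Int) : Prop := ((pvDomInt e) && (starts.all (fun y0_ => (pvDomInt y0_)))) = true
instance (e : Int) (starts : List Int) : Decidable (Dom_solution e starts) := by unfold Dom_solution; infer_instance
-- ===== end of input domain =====

-- B sieves the product-walk hit counts once into an array, precomputes a suffix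
-- first-argmax table and answers each start with one table lookup, instead of A's
-- per-start (n,m) walk over a dict followed by a scan recomputing max() per key.

-- ===== PORT A =====
-- {i: 0 for i in range(s, e+1)}
def dictInitA (e s : Int) : PySem.Dict Int Int :=
  (PySem.List.pyRange s (e+1)).foldl (fun d i => d.insert i 0) PySem.Dict.empty

-- 'for i in dict_num: if dict_num[i] == max(dict_num.values()): answer.append(i); break'
def scanA (d : PySem.Dict Int Int) : List Int → Option Int
  | [] => none
  | i :: rest =>
      if some (d.getD i 0) = PySem.List.max? d.values (fun v => v) then some i
      else scanA d rest

-- the 'while True' loop; the fuel only makes the recursion total (Python A diverges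
-- when e < 1, excluded by Pre_); under Pre_ the fuel is proved sufficient below.
def loopA (e : Int) : Nat → Int → Int → PySem.Dict Int Int → Option Int
  | 0, _, _, _ => none
  | fuel+1, n, m, d =>
      if n * m > e then
        let n' := n + 1
        let m' := n' + 1
        if n' = e + 1 then scanA d d.keys
        else loopA e fuel n' m' d
      else
        let d' := if d.contains (n*m) then d.modify (n*m) 0 (· + 1) else d
        let m' := m + 1
        if n = e + 1 then scanA d' d'.keys
        else loopA e fuel n m' d'

def solution (e : Int) (starts : List Int) : List Int :=
  starts.foldl
    (fun answer s =>
      match loopA e ((e+2).toNat * (e+2).toNat) 1 1 (dictInitA e s) with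
      | some i => answer ++ [i]
      | none => answer)
    []

-- ===== PORT B =====
def solution_alt (e : Int) (starts : List Int) : List Int :=
  if e < 1 then [] else
  let cnt0 : List Int := List.replicate (e+1).toNat 0
  let cnt1 := (PySem.List.pyRange 1 (e+1)).foldl (fun c k => PySem.List.pySetD c k 1) cnt0
  let cnt := (PySem.List.pyRange 2 (e+1)).foldl
    (fun c d =>
      (PySem.List.pyRange (d+1) (PySem.Int.floordiv e d + 1)).foldl
        (fun c m => PySem.List.pySetD c (d*m) (PySem.List.pyGetD c (d*m) 0 + 1)) c)
    cnt1
  let best0 : List Int := List.replicate (e+1).toNat 0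
  let best1 := PySem.List.pySetD best0 e e
  let best := (PySem.List.pyRange (e-1) 0 (-1)).foldl
    (fun b k =>
      PySem.List.pySetD b k
        (if PySem.List.pyGetD cnt k 0 ≥ PySem.List.pyGetD cnt (PySem.List.pyGetD b (k+1) 0) 0
         then k else PySem.List.pyGetD b (k+1) 0))
    best1
  starts.foldl
    (fun answer s =>
      if s ≤ e then answer ++ [PySem.List.pyGetD best (if s ≥ 1 then s else 1) 0]
      else answer)
    []

-- ===== PRECONDITION & SPEC =====
-- Pre_ excludes exactly the inputs on which Python A never returns: e < 1 with a
-- nonempty starts makes A's 'while True' loop run forever (with starts = [] the loop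
-- body never runs, so those inputs stay inside Pre_).
def Pre_solution (e : Int) (starts : List Int) : Prop := 1 ≤ e ∨ starts = []
instance (e : Int) (starts : List Int) : Decidable (Pre_solution e starts) := by
  unfold Pre_solution; infer_instance

def pvWitness_solution : Int × List Int := (6, [1, 3, 8, -2])

def Spec_solution (e : Int) (starts : List Int) (out : List Int) : Prop := out = solution_alt e starts
instance (e : Int) (starts : List Int) (out : List Int) : Decidable (Spec_solution e starts out) := by unfold Spec_solution; infer_instance

-- ===== CLAIM (what is proved, stated in full; the proofs are below) =====
def Claim_equal_solution : Prop := ∀ (e : Int) (starts : List Int), Dom_solution e starts → Pre_solution e starts → Spec_solution e starts (solution e starts)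

-- ===== LEMMAS AND PROOFS =====

-- The multiset of products n*m hit by A's walk for n ≥ lo (n ≥ 2 phases), m > n, n*m ≤ e.
def pairsFrom (e lo : Int) : List Int :=
  (PySem.List.pyRange lo (e+1)).flatMap
    (fun d => (PySem.List.pyRange (d+1) (PySem.Int.floordiv e d + 1)).map (fun m => d*m))

-- The common count: how often A's walk (and B's sieve) hits value k.
def cScore (e k : Int) : Int :=
  (if 1 ≤ k ∧ k ≤ e then 1 else 0) + (((pairsFrom e 2).count k : Nat) : Int)

-- one walk step on the dict
def incD (d : PySem.Dict Int Int) (x : Int) : PySem.Dict Int Int :=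
  if d.contains x then d.modify x 0 (· + 1) else d

-- products still to be hit from walk position (n, m)
def prodsRem (e n m : Int) : List Int :=
  (PySem.List.pyRange m (PySem.Int.floordiv e n + 1)).map (fun x => n*x) ++ pairsFrom e (n+1)

-- fuel cost bound for the walk from position (n, m)
def cb (e n m : Int) : Nat := (e+1-n).toNat * (e.toNat + 2) + (e+1-m).toNat + 1

-- first index in [j..e] attaining the maximal cScore on [j..e]
def brec (e j : Int) : Int :=
  if e ≤ j then e
  else if cScore e j ≥ cScore e (brec e (j+1)) then j else brec e (j+1)
termination_by (e - j).toNat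
decreasing_by omega

lemma brec_base (e j : Int) (h : e ≤ j) : brec e j = e := by
  rw [brec, if_pos h]

lemma brec_step (e j : Int) (h : j < e) :
    brec e j = if cScore e j ≥ cScore e (brec e (j+1)) then j else brec e (j+1) := by
  rw [brec, if_neg (by omega)]

lemma brec_props (e : Int) : ∀ (t : Nat) (j : Int), (e - j).toNat = t → j ≤ e →
    j ≤ brec e j ∧ brec e j ≤ e ∧
    (∀ i, j ≤ i → i ≤ e → cScore e i ≤ cScore e (brec e j)) ∧
    (∀ i, j ≤ i → i < brec e j → cScore e i < cScore e (brec e j)) := by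
  intro t
  induction t with
  | zero =>
      intro j ht hj
      have hje : j = e := by omega
      rw [brec_base e j (by omega)]
      refine ⟨by omega, le_rfl, ?_, ?_⟩
      · intro i h1 h2
        have hie : i = e := by omega
        exact le_of_eq (congrArg (cScore e) hie)
      · intro i h1 h2; exfalso; omega
  | succ t ih =>
      intro j ht hj
      have hjlt : j < e := by omega
      obtain ⟨ih1, ih2, ih3, ih4⟩ := ih (j+1) (by omega) (by omega)
      rw [brec_step e j hjlt]
      by_cases hc : cScore e j ≥ cScore e (brec e (j+1))
      · rw [if_pos hc]
        refine ⟨le_rfl, by omega, ?_, ?_⟩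
        · intro i h1 h2
          rcases eq_or_lt_of_le h1 with h | h
          · rw [← h]
          · exact le_trans (ih3 i (by omega) h2) hc
        · intro i h1 h2; omega
      · rw [if_neg hc]
        push_neg at hc
        refine ⟨by omega, ih2, ?_, ?_⟩
        · intro i h1 h2
          rcases eq_or_lt_of_le h1 with h | h
          · rw [← h]; exact le_of_lt hc
          · exact ih3 i (by omega) h2
        · intro i h1 h2
          rcases eq_or_lt_of_le h1 with h | h
          · rw [← h]; exact hc
          · exact ih4 i (by omega) h2

lemma brec_mem (e j : Int) (hj : j ≤ e) : j ≤ brec e j ∧ brec e j ≤ e :=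
  ⟨(brec_props e _ j rfl hj).1, (brec_props e _ j rfl hj).2.1⟩

lemma brec_max (e j : Int) (hj : j ≤ e) :
    ∀ i, j ≤ i → i ≤ e → cScore e i ≤ cScore e (brec e j) :=
  (brec_props e _ j rfl hj).2.2.1

lemma brec_first (e j : Int) (hj : j ≤ e) :
    ∀ i, j ≤ i → i < brec e j → cScore e i < cScore e (brec e j) :=
  (brec_props e _ j rfl hj).2.2.2

-- elements of pairsFrom e 2 lie in [6, e]
lemma pairs_mem (e x : Int) (hx : x ∈ pairsFrom e 2) : 6 ≤ x ∧ x ≤ e := by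
  unfold pairsFrom at hx
  rw [List.mem_flatMap] at hx
  obtain ⟨d, hd, hx⟩ := hx
  rw [List.mem_map] at hx
  obtain ⟨m, hm, rfl⟩ := hx
  rw [PySem.List.mem_pyRange_one] at hd hm
  obtain ⟨hd1, hd2⟩ := hd
  obtain ⟨hm1, hm2⟩ := hm
  have hdpos : (0:Int) < d := by omega
  have hmfl : m ≤ PySem.Int.floordiv e d := by omega
  have hfl : PySem.Int.floordiv e d * d ≤ e := by
    have := PySem.Int.floordiv_mul_add_mod e d
    have := PySem.Int.mod_nonneg e hdpos
    omega
  constructor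
  · nlinarith
  · nlinarith

lemma cScore_nonpos (e k : Int) (hk : k ≤ 0) : cScore e k = 0 := by
  unfold cScore
  rw [if_neg (by omega)]
  have : (pairsFrom e 2).count k = 0 := by
    rw [List.count_eq_zero]
    intro hmem
    have := pairs_mem e k hmem
    omega
  rw [this]
  simp

lemma cScore_one (e : Int) (he : 1 ≤ e) : cScore e 1 = 1 := by
  unfold cScore
  rw [if_pos ⟨le_rfl, he⟩]
  have : (pairsFrom e 2).count 1 = 0 := by
    rw [List.count_eq_zero]
    intro hmem
    have := pairs_mem e 1 hmem
    omega
  rw [this]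
  simp

-- ---------- A-side: the dict ----------

lemma dictInit_items (e s : Int) :
    (dictInitA e s).items = (PySem.List.pyRange s (e+1)).map (fun i => (i, (0:Int))) := by
  unfold dictInitA
  have h := PySem.Dict.items_foldl_insert_fresh (PySem.List.pyRange s (e+1))
    (fun a => a) (fun _ => (0:Int)) PySem.Dict.empty
    (by intro a _; simp [PySem.Dict.contains, PySem.Dict.empty])
    (by simpa using PySem.List.nodup_pyRange_one s (e+1))
  simpa [PySem.Dict.empty] using h

lemma dictInit_keys (e s : Int) :
    (dictInitA e s).keys = PySem.List.pyRange s (e+1) := by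
  simp [PySem.Dict.keys, dictInit_items, List.map_map, Function.comp_def]

lemma dictInit_getD (e s k : Int) : (dictInitA e s).getD k 0 = 0 := by
  simp only [PySem.Dict.getD, PySem.Dict.get?, dictInit_items]
  rw [List.find?_map]
  cases h : List.find? ((fun p => p.1 == k) ∘ (fun i => (i, (0:Int)))) (PySem.List.pyRange s (e+1)) <;> simp [h]

lemma dictInit_contains (e s k : Int) :
    (dictInitA e s).contains k = true ↔ s ≤ k ∧ k < e + 1 := by
  simp only [PySem.Dict.contains, dictInit_items, List.any_map, List.any_eq_true,
    Function.comp, beq_iff_eq]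
  constructor
  · rintro ⟨i, hi, rfl⟩; exact PySem.List.mem_pyRange_one.mp hi
  · intro h; exact ⟨k, PySem.List.mem_pyRange_one.mpr h, rfl⟩

lemma keys_insert_contains (d : PySem.Dict Int Int) (k v : Int)
    (h : d.contains k = true) : (d.insert k v).keys = d.keys := by
  simp only [PySem.Dict.insert, h, if_pos, PySem.Dict.keys, List.map_map]
  apply List.map_congr_left
  intro p _
  by_cases hpk : p.1 = k
  · simp [hpk]
  · simp [hpk]

lemma incD_keys (d : PySem.Dict Int Int) (x : Int) : (incD d x).keys = d.keys := by
  unfold incD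
  by_cases hc : d.contains x = true
  · rw [if_pos hc, PySem.Dict.keys_modify, keys_insert_contains _ _ _ hc]
  · rw [if_neg hc]

lemma incD_contains (d : PySem.Dict Int Int) (x k : Int) :
    (incD d x).contains k = d.contains k := by
  unfold incD
  by_cases hc : d.contains x = true
  · rw [if_pos hc, PySem.Dict.contains_modify]
    by_cases hk : k = x
    · subst hk; simp [hc]
    · simp [hk]
  · rw [if_neg hc]

lemma incD_getD (d : PySem.Dict Int Int) (x k : Int) :
    (incD d x).getD k 0 = d.getD k 0 + (if d.contains k = true ∧ k = x then 1 else 0) := by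
  unfold incD
  by_cases hc : d.contains x = true
  · rw [if_pos hc, PySem.Dict.getD_modify]
    by_cases hk : k = x
    · subst hk; simp [hc]
    · simp [hk]
  · rw [if_neg hc]
    have : ¬ (d.contains k = true ∧ k = x) := by
      rintro ⟨h1, rfl⟩; exact hc h1
    simp [this]

lemma foldl_incD_keys (L : List Int) (d : PySem.Dict Int Int) :
    (L.foldl incD d).keys = d.keys := by
  induction L generalizing d with
  | nil => rfl
  | cons x t ih => rw [List.foldl_cons, ih, incD_keys]

lemma foldl_incD_getD (L : List Int) (d : PySem.Dict Int Int) (k : Int) :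
    (L.foldl incD d).getD k 0 =
      d.getD k 0 + (if d.contains k = true then ((L.count k : Nat) : Int) else 0) := by
  induction L generalizing d with
  | nil => simp
  | cons x t ih =>
      rw [List.foldl_cons, ih, incD_getD, incD_contains]
      by_cases hc : d.contains k = true
      · by_cases hk : k = x
        · subst hk
          simp [hc, List.count_cons]
          push_cast
          ring
        · have : (x :: t).count k = t.count k := by
            simp [List.count_cons, hk]
            intro h; exact absurd h.symm hk
          simp [hc, hk, this]
      · simp [hc]

-- ---------- A-side: the loop normal form ----------

lemma cb_pos (e n m : Int) : 1 ≤ cb e n m := by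
  unfold cb; omega

lemma cb_else (e n m : Int) (hm : m ≤ e) : cb e n (m+1) + 1 ≤ cb e n m := by
  unfold cb
  set P := (e+1-n).toNat * (e.toNat + 2) with hP
  omega

lemma cb_then (e n m : Int) (h1 : 1 ≤ n) (h2 : n < e) :
    cb e (n+1) (n+2) + 1 ≤ cb e n m := by
  unfold cb
  have h3 : (e+1-n).toNat = (e+1-(n+1)).toNat + 1 := by omega
  rw [h3, Nat.succ_mul]
  set P := (e+1-(n+1)).toNat * (e.toNat + 2) with hP
  omega

lemma cb_start (e : Int) (he : 1 ≤ e) : cb e 1 1 ≤ (e+2).toNat * (e+2).toNat := by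
  unfold cb
  have h1 : (e+1-1).toNat = e.toNat := by omega
  have h2 : (e+2).toNat = e.toNat + 2 := by omega
  rw [h1, h2]
  nlinarith [e.toNat.zero_le]

lemma pairsFrom_cons (e n : Int) (h : n < e + 1) :
    pairsFrom e n =
      (PySem.List.pyRange (n+1) (PySem.Int.floordiv e n + 1)).map (fun m => n*m)
        ++ pairsFrom e (n+1) := by
  unfold pairsFrom
  rw [PySem.List.pyRange_one_cons h, List.flatMap_cons]

lemma pairsFrom_nil (e n : Int) (h : e + 1 ≤ n) : pairsFrom e n = [] := by
  unfold pairsFrom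
  rw [PySem.List.pyRange_one_eq_nil h, List.flatMap_nil]

lemma loopA_nf (e : Int) (he : 1 ≤ e) :
    ∀ (fuel : Nat) (n m : Int) (d : PySem.Dict Int Int), 1 ≤ n → n ≤ e → cb e n m ≤ fuel →
      loopA e fuel n m d =
        scanA ((prodsRem e n m).foldl incD d) ((prodsRem e n m).foldl incD d).keys := by
  intro fuel
  induction fuel with
  | zero =>
      intro n m d h1 h2 hf
      exact absurd hf (by have := cb_pos e n m; omega)
  | succ fuel ih =>
      intro n m d h1 h2 hf
      have hn0 : (0:Int) < n := by omega
      by_cases hnm : n * m > e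
      · have hfl : PySem.Int.floordiv e n < m :=
          (PySem.Int.floordiv_lt_iff_lt_mul hn0).mpr (by nlinarith)
        have hempty : PySem.List.pyRange m (PySem.Int.floordiv e n + 1) = [] :=
          PySem.List.pyRange_one_eq_nil (by omega)
        have hpr : prodsRem e n m = pairsFrom e (n+1) := by
          unfold prodsRem; rw [hempty, List.map_nil, List.nil_append]
        by_cases hne : n = e
        · simp only [loopA, if_pos hnm]
          rw [if_pos (show n + 1 = e + 1 by omega)]
          rw [hpr, pairsFrom_nil e (n+1) (by omega), List.foldl_nil]
        · have hlt : n < e := lt_of_le_of_ne h2 hne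
          simp only [loopA, if_pos hnm, if_neg (show ¬ n + 1 = e + 1 by omega)]
          rw [show n + 1 + 1 = n + 2 from by ring]
          rw [ih (n+1) (n+2) d (by omega) (by omega)
            (by have := cb_then e n m h1 hlt; omega)]
          have hpr2 : prodsRem e n m = prodsRem e (n+1) (n+2) := by
            rw [hpr, pairsFrom_cons e (n+1) (by omega)]
            unfold prodsRem
            rw [show n + 1 + 1 = n + 2 from by ring]
          rw [hpr2]
      · push_neg at hnm
        have hmle : m ≤ PySem.Int.floordiv e n :=
          (PySem.Int.le_floordiv_iff_mul_le hn0).mpr (by nlinarith)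
        have hme : m ≤ e := by
          by_cases hm0 : m ≤ 0
          · omega
          · nlinarith
        have hcons : PySem.List.pyRange m (PySem.Int.floordiv e n + 1)
            = m :: PySem.List.pyRange (m+1) (PySem.Int.floordiv e n + 1) :=
          PySem.List.pyRange_one_cons (by omega)
        have hpr : prodsRem e n m = n*m :: prodsRem e n (m+1) := by
          unfold prodsRem; rw [hcons, List.map_cons, List.cons_append]
        simp only [loopA, if_neg (show ¬ n * m > e by omega),
          if_neg (show ¬ n = e + 1 by omega)]
        have hinc : (if d.contains (n*m) = true then d.modify (n*m) 0 (· + 1) else d)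
            = incD d (n*m) := rfl
        rw [hinc, ih n (m+1) (incD d (n*m)) h1 h2 (by have := cb_else e n m hme; omega),
          hpr, List.foldl_cons]

-- ---------- A-side: the scan ----------

lemma scanA_eq_find (d : PySem.Dict Int Int) (l : List Int) :
    scanA d l = l.find?
      (fun i => decide (some (d.getD i 0) = PySem.List.max? d.values (fun v => v))) := by
  induction l with
  | nil => rfl
  | cons i t ih =>
      by_cases h : some (d.getD i 0) = PySem.List.max? d.values (fun v => v)
      · simp [scanA, h, List.find?_cons]
      · simp [scanA, h, List.find?_cons, ih]

-- the final dict of a start s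
lemma finalD_getD (e s k : Int) (hk1 : s ≤ k) (hk2 : k ≤ e) :
    ((prodsRem e 1 1).foldl incD (dictInitA e s)).getD k 0 = cScore e k := by
  rw [foldl_incD_getD, dictInit_getD]
  rw [if_pos ((dictInit_contains e s k).mpr ⟨hk1, by omega⟩)]
  have hfd : PySem.Int.floordiv e 1 = e := by
    rw [PySem.Int.floordiv_eq_ediv_of_pos one_pos, Int.ediv_one]
  have hpr : prodsRem e 1 1 = PySem.List.pyRange 1 (e+1) ++ pairsFrom e 2 := by
    unfold prodsRem
    rw [hfd]
    congr 1
    simp [one_mul]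
  rw [hpr, List.count_append]
  have hr : (PySem.List.pyRange 1 (e+1)).count k = if 1 ≤ k ∧ k ≤ e then 1 else 0 := by
    by_cases h : 1 ≤ k ∧ k ≤ e
    · rw [if_pos h]
      exact List.count_eq_one_of_mem (PySem.List.nodup_pyRange_one 1 (e+1))
        (PySem.List.mem_pyRange_one.mpr ⟨h.1, by omega⟩)
    · rw [if_neg h, List.count_eq_zero]
      intro hmem
      have := PySem.List.mem_pyRange_one.mp hmem
      omega
  unfold cScore
  rw [hr]
  push_cast
  by_cases h : 1 ≤ k ∧ k ≤ e <;> simp [h]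

lemma finalD_keys (e s : Int) :
    ((prodsRem e 1 1).foldl incD (dictInitA e s)).keys = PySem.List.pyRange s (e+1) := by
  rw [foldl_incD_keys, dictInit_keys]

lemma finalD_values (e s : Int) (he : 1 ≤ e) (hse : s ≤ e) :
    ((prodsRem e 1 1).foldl incD (dictInitA e s)).values
      = (PySem.List.pyRange s (e+1)).map (cScore e) := by
  rw [PySem.Dict.values_eq_map_keys _ (by rw [finalD_keys]; exact PySem.List.nodup_pyRange_one s (e+1)) 0]
  rw [finalD_keys]
  apply List.map_congr_left
  intro i hi
  have := PySem.List.mem_pyRange_one.mp hi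
  exact finalD_getD e s i this.1 (by omega)

lemma max_values (e s : Int) (he : 1 ≤ e) (hse : s ≤ e) :
    PySem.List.max? ((prodsRem e 1 1).foldl incD (dictInitA e s)).values (fun v => v)
      = some (cScore e (brec e (if 1 ≤ s then s else 1))) := by
  set j := if 1 ≤ s then s else 1 with hj
  have hjcases : j = s ∨ j = 1 := by rw [hj]; split; exacts [Or.inl rfl, Or.inr rfl]
  have hj1 : 1 ≤ j := by rw [hj]; split <;> omega
  have hjs : s ≤ j := by rw [hj]; split <;> omega
  have hje : j ≤ e := by rw [hj]; split <;> omega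
  set b := brec e j with hb
  obtain ⟨hb1, hb2⟩ := brec_mem e j hje
  rw [finalD_values e s he hse]
  have hne : (PySem.List.pyRange s (e+1)).map (cScore e) ≠ [] := by
    simp only [ne_eq, List.map_eq_nil_iff]
    intro h
    have : s ∈ PySem.List.pyRange s (e+1) := PySem.List.mem_pyRange_one.mpr ⟨le_rfl, by omega⟩
    rw [h] at this
    exact absurd this (List.not_mem_nil)
  obtain ⟨v, hv⟩ : ∃ v, PySem.List.max? ((PySem.List.pyRange s (e+1)).map (cScore e)) (fun v => v) = some v := by
    cases hvv : PySem.List.max? ((PySem.List.pyRange s (e+1)).map (cScore e)) (fun v => v) with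
    | none => exact absurd ((PySem.List.max?_eq_none_iff _ _).mp hvv) hne
    | some v => exact ⟨v, rfl⟩
  rw [hv]
  congr 1
  have hmem := PySem.List.max?_mem hv
  rw [List.mem_map] at hmem
  obtain ⟨i0, hi0, rfl⟩ := hmem
  have hi0r := PySem.List.mem_pyRange_one.mp hi0
  have hmax := PySem.List.max?_isMax hv
  -- cScore e i0 ≤ cScore e b
  have hle : cScore e i0 ≤ cScore e b := by
    by_cases hcase : j ≤ i0
    · exact brec_max e j hje i0 hcase (by omega)
    · -- only possible when s ≤ 0 (so j = 1) and i0 ≤ 0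
      have hjeq : j = 1 := by
        rcases hjcases with h | h
        · exfalso; omega
        · exact h
      have hz : cScore e i0 = 0 := cScore_nonpos e i0 (by omega)
      have h2 : cScore e 1 ≤ cScore e b := brec_max e j hje 1 (by omega) he
      rw [cScore_one e he] at h2
      omega
  -- cScore e b ≤ cScore e i0 since b is a value in the list
  have hge : cScore e b ≤ cScore e i0 := by
    have hbmem : cScore e b ∈ (PySem.List.pyRange s (e+1)).map (cScore e) := by
      rw [List.mem_map]
      exact ⟨b, PySem.List.mem_pyRange_one.mpr ⟨by omega, by omega⟩, rfl⟩
    exact hmax _ hbmem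
  omega

lemma scan_finds (e s : Int) (he : 1 ≤ e) (hse : s ≤ e) :
    scanA ((prodsRem e 1 1).foldl incD (dictInitA e s))
        ((prodsRem e 1 1).foldl incD (dictInitA e s)).keys
      = some (brec e (if 1 ≤ s then s else 1)) := by
  set D := (prodsRem e 1 1).foldl incD (dictInitA e s) with hD
  set j := if 1 ≤ s then s else 1 with hj
  have hjcases : j = s ∨ j = 1 := by rw [hj]; split; exacts [Or.inl rfl, Or.inr rfl]
  have hj1 : 1 ≤ j := by rw [hj]; split <;> omega
  have hjs : s ≤ j := by rw [hj]; split <;> omega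
  have hje : j ≤ e := by rw [hj]; split <;> omega
  set b := brec e j with hb
  obtain ⟨hb1, hb2⟩ := brec_mem e j hje
  rw [scanA_eq_find, finalD_keys, max_values e s he hse, ← hj, ← hb]
  rw [PySem.List.pyRange_one_append s b (e+1) (by omega) (by omega)]
  rw [List.find?_append]
  have h1 : List.find? (fun i => decide (some (D.getD i 0) = some (cScore e b)))
      (PySem.List.pyRange s b) = none := by
    rw [List.find?_eq_none]
    intro i hi
    obtain ⟨hia, hib⟩ := PySem.List.mem_pyRange_one.mp hi
    simp only [decide_eq_true_eq, Option.some_inj]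
    intro hcontra
    rw [finalD_getD e s i hia (by omega)] at hcontra
    by_cases hcase : j ≤ i
    · have hlt := brec_first e j hje i hcase (by omega)
      rw [← hb] at hlt
      omega
    · have hjeq : j = 1 := by
        rcases hjcases with h | h
        · exfalso; omega
        · exact h
      have hz : cScore e i = 0 := cScore_nonpos e i (by omega)
      have h2 : cScore e 1 ≤ cScore e b := brec_max e j hje 1 (by omega) he
      rw [cScore_one e he] at h2
      omega
  rw [h1, Option.none_or]
  rw [PySem.List.pyRange_one_cons (show b < e + 1 by omega)]
  have hcond : (fun i => decide (some (D.getD i 0) = some (cScore e b))) b = true := by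
    simp only [decide_eq_true_eq, Option.some_inj]
    exact finalD_getD e s b (by omega) hb2
  exact List.find?_cons_of_pos hcond

lemma perStart (e s : Int) (he : 1 ≤ e) (hse : s ≤ e) :
    loopA e ((e+2).toNat * (e+2).toNat) 1 1 (dictInitA e s)
      = some (brec e (if 1 ≤ s then s else 1)) := by
  rw [loopA_nf e he _ 1 1 (dictInitA e s) le_rfl he (cb_start e he)]
  exact scan_finds e s he hse

lemma perStartNone (e s : Int) (he : 1 ≤ e) (hse : e < s) :
    loopA e ((e+2).toNat * (e+2).toNat) 1 1 (dictInitA e s) = none := by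
  rw [loopA_nf e he _ 1 1 (dictInitA e s) le_rfl he (cb_start e he)]
  rw [show ((prodsRem e 1 1).foldl incD (dictInitA e s)).keys = [] by
    rw [finalD_keys]; exact PySem.List.pyRange_one_eq_nil (by omega)]
  rfl

-- ---------- B-side ----------

def cntB (e : Int) : List Int :=
  (PySem.List.pyRange 2 (e+1)).foldl
    (fun c d =>
      (PySem.List.pyRange (d+1) (PySem.Int.floordiv e d + 1)).foldl
        (fun c m => PySem.List.pySetD c (d*m) (PySem.List.pyGetD c (d*m) 0 + 1)) c)
    ((PySem.List.pyRange 1 (e+1)).foldl (fun c k => PySem.List.pySetD c k 1)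
      (List.replicate (e+1).toNat 0))

def bestB (e : Int) : List Int :=
  (PySem.List.pyRange (e-1) 0 (-1)).foldl
    (fun b k =>
      PySem.List.pySetD b k
        (if PySem.List.pyGetD (cntB e) k 0 ≥ PySem.List.pyGetD (cntB e) (PySem.List.pyGetD b (k+1) 0) 0
         then k else PySem.List.pyGetD b (k+1) 0))
    (PySem.List.pySetD (List.replicate (e+1).toNat 0) e e)

lemma pyGetD_pySetD' (xs : List Int) (i k v : Int)
    (hi0 : 0 ≤ i) (hil : i < (xs.length : Int)) (hk0 : 0 ≤ k) (hkl : k < (xs.length : Int)) :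
    PySem.List.pyGetD (PySem.List.pySetD xs i v) k 0 = if k = i then v else PySem.List.pyGetD xs k 0 := by
  have h1 : i = ((i.toNat : Nat) : Int) := by omega
  have h2 : k = ((k.toNat : Nat) : Int) := by omega
  rw [h1, h2, PySem.List.pyGetD_pySetD_natCast xs i.toNat k.toNat v 0 (by omega)]
  by_cases h : k.toNat = i.toNat
  · rw [if_pos h, if_pos (by omega)]
  · rw [if_neg h, if_neg (by omega)]

lemma pyGetD_replicate (n : Nat) (k : Int) (hk0 : 0 ≤ k) (hkl : k < (n : Int)) :
    PySem.List.pyGetD (List.replicate n (0:Int)) k 0 = 0 := by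
  rw [PySem.List.pyGetD_eq_getElem _ _ hk0 (by simpa using hkl)]
  simp

lemma foldl_len_preserved (f : List Int → Int → List Int)
    (hf : ∀ c x, (f c x).length = c.length) :
    ∀ (L : List Int) (c : List Int), (L.foldl f c).length = c.length := by
  intro L
  induction L with
  | nil => intro c; rfl
  | cons x t ih => intro c; rw [List.foldl_cons, ih, hf]

lemma setconst_fold (v : Int) : ∀ (L : List Int) (c : List Int),
    (∀ x ∈ L, 0 ≤ x ∧ x < (c.length : Int)) →
    ∀ k, 0 ≤ k → k < (c.length : Int) →
    PySem.List.pyGetD (L.foldl (fun c x => PySem.List.pySetD c x v) c) k 0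
      = if k ∈ L then v else PySem.List.pyGetD c k 0 := by
  intro L
  induction L with
  | nil => intro c _ k _ _; simp
  | cons x t ih =>
      intro c hL k hk0 hkl
      rw [List.foldl_cons]
      have hx := hL x (List.mem_cons_self)
      have hlen : (PySem.List.pySetD c x v).length = c.length := PySem.List.length_pySetD c x v
      rw [ih (PySem.List.pySetD c x v)
        (by intro y hy; rw [hlen]; exact hL y (List.mem_cons_of_mem _ hy))
        k hk0 (by rw [hlen]; exact hkl)]
      rw [pyGetD_pySetD' c x k v hx.1 hx.2 hk0 hkl]
      by_cases h1 : k ∈ t <;> by_cases h2 : k = x <;> simp [h1, h2, List.mem_cons]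

lemma incr_fold : ∀ (L : List Int) (c : List Int),
    (∀ x ∈ L, 0 ≤ x ∧ x < (c.length : Int)) →
    ∀ k, 0 ≤ k → k < (c.length : Int) →
    PySem.List.pyGetD (L.foldl (fun c x => PySem.List.pySetD c x (PySem.List.pyGetD c x 0 + 1)) c) k 0
      = PySem.List.pyGetD c k 0 + ((L.count k : Nat) : Int) := by
  intro L
  induction L with
  | nil => intro c _ k _ _; simp
  | cons x t ih =>
      intro c hL k hk0 hkl
      rw [List.foldl_cons]
      have hx := hL x (List.mem_cons_self)
      have hlen : (PySem.List.pySetD c x (PySem.List.pyGetD c x 0 + 1)).length = c.length :=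
        PySem.List.length_pySetD _ _ _
      rw [ih (PySem.List.pySetD c x (PySem.List.pyGetD c x 0 + 1))
        (by intro y hy; rw [hlen]; exact hL y (List.mem_cons_of_mem _ hy))
        k hk0 (by rw [hlen]; exact hkl)]
      rw [pyGetD_pySetD' c x k _ hx.1 hx.2 hk0 hkl]
      by_cases h : k = x
      · subst h
        rw [if_pos rfl]
        simp [List.count_cons]
        push_cast
        ring
      · rw [if_neg h]
        have : (x :: t).count k = t.count k := by
          simp [List.count_cons]
          intro hh; exact absurd hh.symm h
        rw [this]

lemma cnt1_len (e : Int) :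
    ((PySem.List.pyRange 1 (e+1)).foldl (fun c k => PySem.List.pySetD c k 1)
      (List.replicate (e+1).toNat (0:Int))).length = (e+1).toNat := by
  rw [foldl_len_preserved (fun c k => PySem.List.pySetD c k 1)
    (fun c x => PySem.List.length_pySetD c x 1)]
  simp

lemma cnt1_getD (e k : Int) (he : 1 ≤ e) (hk0 : 0 ≤ k) (hke : k ≤ e) :
    PySem.List.pyGetD ((PySem.List.pyRange 1 (e+1)).foldl (fun c k => PySem.List.pySetD c k 1)
      (List.replicate (e+1).toNat (0:Int))) k 0 = if 1 ≤ k ∧ k ≤ e then 1 else 0 := by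
  have hlen : ((List.replicate (e+1).toNat (0:Int)).length : Int) = e + 1 := by
    simp; omega
  rw [setconst_fold 1 _ _
    (by intro x hx; have := PySem.List.mem_pyRange_one.mp hx; rw [hlen]; omega)
    k hk0 (by rw [hlen]; omega)]
  by_cases h : 1 ≤ k ∧ k ≤ e
  · rw [if_pos (PySem.List.mem_pyRange_one.mpr ⟨h.1, by omega⟩), if_pos h]
  · rw [if_neg (by intro hmem; exact h (by have := PySem.List.mem_pyRange_one.mp hmem; omega)),
      if_neg h]
    exact pyGetD_replicate _ k hk0 (by omega)

lemma cntB_getD (e k : Int) (he : 1 ≤ e) (hk0 : 0 ≤ k) (hke : k ≤ e) :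
    PySem.List.pyGetD (cntB e) k 0 = cScore e k := by
  unfold cntB
  have hflat : (PySem.List.pyRange 2 (e+1)).foldl
      (fun c d =>
        (PySem.List.pyRange (d+1) (PySem.Int.floordiv e d + 1)).foldl
          (fun c m => PySem.List.pySetD c (d*m) (PySem.List.pyGetD c (d*m) 0 + 1)) c)
      ((PySem.List.pyRange 1 (e+1)).foldl (fun c k => PySem.List.pySetD c k 1)
        (List.replicate (e+1).toNat (0:Int)))
    = (pairsFrom e 2).foldl
        (fun c x => PySem.List.pySetD c x (PySem.List.pyGetD c x 0 + 1))
        ((PySem.List.pyRange 1 (e+1)).foldl (fun c k => PySem.List.pySetD c k 1)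
          (List.replicate (e+1).toNat (0:Int))) := by
    unfold pairsFrom
    rw [List.foldl_flatMap]
    congr 1
    funext c d
    rw [List.foldl_map]
  rw [hflat]
  have hlen1 : (((PySem.List.pyRange 1 (e+1)).foldl (fun c k => PySem.List.pySetD c k 1)
      (List.replicate (e+1).toNat (0:Int))).length : Int) = e + 1 := by
    rw [cnt1_len]; omega
  rw [incr_fold _ _
    (by intro x hx; have := pairs_mem e x hx; rw [hlen1]; omega)
    k hk0 (by rw [hlen1]; omega)]
  rw [cnt1_getD e k he hk0 hke]
  unfold cScore
  rfl

lemma best_fold (e : Int) (he : 1 ≤ e) :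
    ∀ (t : Nat) (ti : Int), ti.toNat = t → 0 ≤ ti → ti ≤ e - 1 →
    ∀ b : List Int, b.length = (e+1).toNat →
      (∀ j, ti+1 ≤ j → j ≤ e → PySem.List.pyGetD b j 0 = brec e j) →
      ((PySem.List.pyRange ti 0 (-1)).foldl
        (fun b k =>
          PySem.List.pySetD b k
            (if PySem.List.pyGetD (cntB e) k 0 ≥ PySem.List.pyGetD (cntB e) (PySem.List.pyGetD b (k+1) 0) 0
             then k else PySem.List.pyGetD b (k+1) 0)) b).length = (e+1).toNat ∧
      (∀ j, 1 ≤ j → j ≤ e →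
        PySem.List.pyGetD ((PySem.List.pyRange ti 0 (-1)).foldl
          (fun b k =>
            PySem.List.pySetD b k
              (if PySem.List.pyGetD (cntB e) k 0 ≥ PySem.List.pyGetD (cntB e) (PySem.List.pyGetD b (k+1) 0) 0
               then k else PySem.List.pyGetD b (k+1) 0)) b) j 0 = brec e j) := by
  intro t
  induction t with
  | zero =>
      intro ti ht h0 h1 b hlen hinv
      have : ti = 0 := by omega
      subst this
      rw [PySem.List.pyRange_neg_one_eq_nil le_rfl, List.foldl_nil]
      exact ⟨hlen, fun j hj1 hj2 => hinv j (by omega) hj2⟩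
  | succ t ih =>
      intro ti ht h0 h1 b hlen hinv
      have hti1 : 1 ≤ ti := by omega
      rw [PySem.List.pyRange_neg_one_cons (show (0:Int) < ti by omega), List.foldl_cons]
      have hblen : (b.length : Int) = e + 1 := by rw [hlen]; omega
      -- the value read at ti+1
      have hread : PySem.List.pyGetD b (ti+1) 0 = brec e (ti+1) := hinv (ti+1) le_rfl (by omega)
      obtain ⟨hbr1, hbr2⟩ := brec_mem e (ti+1) (by omega)
      -- the written value is brec e ti
      have hwrite :
          (if PySem.List.pyGetD (cntB e) ti 0 ≥ PySem.List.pyGetD (cntB e) (PySem.List.pyGetD b (ti+1) 0) 0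
           then ti else PySem.List.pyGetD b (ti+1) 0) = brec e ti := by
        rw [hread, cntB_getD e ti he (by omega) (by omega),
          cntB_getD e (brec e (ti+1)) he (by omega) (by omega),
          brec_step e ti (by omega)]
      rw [hwrite]
      have hlen1 : (PySem.List.pySetD b ti (brec e ti)).length = (e+1).toNat := by
        rw [PySem.List.length_pySetD, hlen]
      refine ih (ti - 1) (by omega) (by omega) (by omega) _ hlen1 ?_
      intro j hj1 hj2
      rw [pyGetD_pySetD' b ti j (brec e ti) (by omega) (by omega) (by omega) (by omega)]
      by_cases hj : j = ti
      · rw [if_pos hj, hj]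
      · rw [if_neg hj]
        exact hinv j (by omega) hj2

lemma bestB_getD (e j : Int) (he : 1 ≤ e) (hj1 : 1 ≤ j) (hj2 : j ≤ e) :
    PySem.List.pyGetD (bestB e) j 0 = brec e j := by
  unfold bestB
  have hlen0 : ((List.replicate (e+1).toNat (0:Int)).length : Int) = e + 1 := by simp; omega
  have hlen1 : (PySem.List.pySetD (List.replicate (e+1).toNat (0:Int)) e e).length = (e+1).toNat := by
    rw [PySem.List.length_pySetD]; simp
  have hinit : ∀ j', e - 1 + 1 ≤ j' → j' ≤ e →
      PySem.List.pyGetD (PySem.List.pySetD (List.replicate (e+1).toNat (0:Int)) e e) j' 0 = brec e j' := by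
    intro j' hj'1 hj'2
    have hj'e : j' = e := by omega
    rw [hj'e]
    rw [pyGetD_pySetD' _ e e e (by omega) (by rw [hlen0]; omega) (by omega) (by rw [hlen0]; omega)]
    rw [if_pos rfl, brec_base e e le_rfl]
  exact (best_fold e he (e-1).toNat (e-1) rfl (by omega) le_rfl _ hlen1 hinit).2 j hj1 hj2

-- ---------- final assembly ----------

lemma solution_eq (e : Int) (starts : List Int) (he : 1 ≤ e) :
    solution e starts = starts.foldl
      (fun answer s => if s ≤ e then answer ++ [brec e (if 1 ≤ s then s else 1)] else answer)
      [] := by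
  unfold solution
  congr 1
  funext answer s
  by_cases hs : s ≤ e
  · rw [perStart e s he hs, if_pos hs]
  · rw [perStartNone e s he (by omega), if_neg hs]

lemma solution_alt_eq (e : Int) (starts : List Int) (he : 1 ≤ e) :
    solution_alt e starts = starts.foldl
      (fun answer s => if s ≤ e then answer ++ [brec e (if 1 ≤ s then s else 1)] else answer)
      [] := by
  unfold solution_alt
  rw [if_neg (by omega)]
  show starts.foldl
      (fun answer s => if s ≤ e then answer ++ [PySem.List.pyGetD (bestB e) (if s ≥ 1 then s else 1) 0] else answer)
      [] = _
  congr 1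
  funext answer s
  by_cases hs : s ≤ e
  · rw [if_pos hs, if_pos hs]
    congr 2
    have hj1 : 1 ≤ (if s ≥ 1 then s else 1) := by split <;> omega
    have hj2 : (if s ≥ 1 then s else 1) ≤ e := by split <;> omega
    rw [bestB_getD e _ he hj1 hj2]
  · rw [if_neg hs, if_neg hs]

-- ===== VERDICT (by name: the statement is the Claim_ definition above) =====
theorem solution_spec : Claim_equal_solution := by
  intro e starts _ hpre
  unfold Spec_solution
  rcases hpre with hpre | rfl
  · rw [solution_eq e starts hpre, solution_alt_eq e starts hpre]
  · unfold solution solution_alt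
    simp
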